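-- pv_equiv track=rewrite | github.com/Semakia/explorators | main.py | get_longest_explorator_path
-- ===== SOURCE A (Python) =====
-- def get_longest_explorator_path(starting_nodes, ending_nodes, dict_upstream_downstream):
--     max_distance = 0
--     longest_path = None
--
--     for starting_node in starting_nodes:
--         explorator_path = [starting_node]
--         distance = 0
--
--         while explorator_path[-1] not in ending_nodes:
--             downstream_node, edge_distance = dict_upstream_downstream[explorator_path[-1]]
--             distance += edge_distance
--             explorator_path.append(downstream_node)
--
--         if distance > max_distance:
--             longest_path = explorator_path
--             max_distance = distance
--
--     return longest_path
-- ===== SOURCE B (Python) =====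
-- def get_longest_explorator_path(starting_nodes, ending_nodes, dict_upstream_downstream):
--     ending = set(ending_nodes)
--     memo = {}  # node -> total distance from node to its ending node
--
--     def distance_to_end(node):
--         # walk down until an ending node or an already-memoized node,
--         # remembering the traversed edges, then fill the memo backwards
--         stack = []
--         cur = node
--         while cur not in ending and cur not in memo:
--             nxt, edge = dict_upstream_downstream[cur]
--             stack.append((cur, edge))
--             cur = nxt
--         d = 0 if cur in ending else memo[cur]
--         for n, edge in reversed(stack):
--             d += edge
--             memo[n] = d
--         return d
--
--     best = 0
--     winner = None
--     for s in starting_nodes: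
--         d = distance_to_end(s)
--         if d > best:
--             best = d
--             winner = s
--     if winner is None:
--         return None
--     path = [winner]
--     while path[-1] not in ending:
--         path.append(dict_upstream_downstream[path[-1]][0])
--     return path
-- ===== Notes on version B (the rewrite author's own statement) =====
-- stated objective: alternative
-- what changed: B memoizes each node's distance-to-end in a dict filled backwards along each walk, selects the best starting node using distances only, and reconstructs just the winning path, instead of A's full path-building walk from every starting node.
import Mathlib
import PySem

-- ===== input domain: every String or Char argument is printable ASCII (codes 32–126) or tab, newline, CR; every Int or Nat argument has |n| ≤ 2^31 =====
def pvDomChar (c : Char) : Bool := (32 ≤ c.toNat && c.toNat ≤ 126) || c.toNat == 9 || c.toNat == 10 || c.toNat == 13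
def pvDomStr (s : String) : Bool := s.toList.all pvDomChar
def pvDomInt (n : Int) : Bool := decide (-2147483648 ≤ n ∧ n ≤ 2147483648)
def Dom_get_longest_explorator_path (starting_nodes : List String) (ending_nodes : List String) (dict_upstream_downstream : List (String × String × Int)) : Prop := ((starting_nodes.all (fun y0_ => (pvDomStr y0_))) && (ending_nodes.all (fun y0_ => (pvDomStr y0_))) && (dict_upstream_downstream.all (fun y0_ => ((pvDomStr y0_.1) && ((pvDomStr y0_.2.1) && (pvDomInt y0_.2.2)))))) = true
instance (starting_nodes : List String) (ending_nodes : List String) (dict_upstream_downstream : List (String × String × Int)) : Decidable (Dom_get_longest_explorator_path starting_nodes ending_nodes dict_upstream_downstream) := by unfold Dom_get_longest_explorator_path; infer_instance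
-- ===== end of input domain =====

-- B memoizes each node's distance-to-end and reconstructs only the winning path
-- (one shared walk per node instead of a full path walk per starting node).
-- ===== PORT A =====
-- Python dict lookup (first match on the association list)
def pvLookup (D : List (String × String × Int)) (k : String) : Option (String × Int) :=
  (D.find? (fun pr => pr.1 == k)).map (fun pr => pr.2)

-- A's inner while loop; the path is carried reversed (head = path[-1]); fuel
-- |dict|+1 bounds any terminating walk, none = KeyError / infinite loop
def walkA (E : List String) (D : List (String × String × Int)) :
    Nat → List String → Int → Option (List String × Int)
  | 0, _, _ => none
  | f+1, rpath, dist =>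
    match rpath with
    | [] => none
    | last :: _ =>
      if last ∈ E then some (rpath.reverse, dist)
      else
        match pvLookup D last with
        | none => none
        | some (m, e) => walkA E D f (m :: rpath) (dist + e)

def get_longest_explorator_path (starting_nodes : List String) (ending_nodes : List String) (dict_upstream_downstream : List (String × String × Int)) : Option (List String) :=
  (starting_nodes.foldl
    (fun st s =>
      match walkA ending_nodes dict_upstream_downstream (dict_upstream_downstream.length + 1) [s] 0 with
      | none => st
      | some (p, d) => if d > st.1 then (d, some p) else st)
    ((0 : Int), (none : Option (List String)))).2

-- ===== PORT B =====
-- B's descent loop: walk down until an ending or memoized node, pushing (node, edge)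
def stackB (E : List String) (D : List (String × String × Int)) :
    Nat → PySem.Dict String Int → String → List (String × Int) → Option (String × List (String × Int))
  | 0, _, _, _ => none
  | f+1, memo, cur, stack =>
    if cur ∈ E ∨ (memo.get? cur).isSome then some (cur, stack)
    else
      match pvLookup D cur with
      | none => none
      | some (nxt, e) => stackB E D f memo nxt (stack ++ [(cur, e)])

-- B's distance_to_end: descend, then fill the memo backwards over reversed(stack)
def distB (E : List String) (D : List (String × String × Int))
    (memo : PySem.Dict String Int) (node : String) : Option (Int × PySem.Dict String Int) :=
  match stackB E D (D.length + 1) memo node [] with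
  | none => none
  | some (cur, stack) =>
    match (if cur ∈ E then some (0 : Int) else memo.get? cur) with
    | none => none
    | some d0 =>
      some (stack.reverse.foldl
        (fun ac pr => (ac.1 + pr.2, ac.2.insert pr.1 (ac.1 + pr.2))) (d0, memo))

-- B's final reconstruction loop (path carried reversed)
def reconB (E : List String) (D : List (String × String × Int)) :
    Nat → List String → Option (List String)
  | 0, _ => none
  | f+1, rpath =>
    match rpath with
    | [] => none
    | last :: _ =>
      if last ∈ E then some rpath.reverse
      else
        match pvLookup D last with
        | none => none
        | some (m, _) => reconB E D f (m :: rpath)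

def get_longest_explorator_path_alt (starting_nodes : List String) (ending_nodes : List String) (dict_upstream_downstream : List (String × String × Int)) : Option (List String) :=
  let st := starting_nodes.foldl
    (fun st s =>
      match distB ending_nodes dict_upstream_downstream st.1 s with
      | none => st
      | some (d, memo') => if d > st.2.1 then (memo', d, some s) else (memo', st.2.1, st.2.2))
    (PySem.Dict.empty, (0 : Int), (none : Option String))
  match st.2.2 with
  | none => none
  | some w => reconB ending_nodes dict_upstream_downstream (dict_upstream_downstream.length + 1) [w]

-- ===== PRECONDITION & SPEC =====
-- the nodes whose walk reaches an ending node: |dict| rounds of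
-- "a node is good if it is an ending node or its downstream node is already good"
def goodSet (E : List String) (D : List (String × String × Int)) : List String :=
  (fun S => S ++ (D.map (fun pr => pr.1)).filter
      (fun k => match pvLookup D k with
                | some (m, _) => decide (m ∈ S)
                | none => false))^[D.length] E

-- Pre_ excludes exactly the inputs on which A raises KeyError (a walk hits a node that is
-- neither an ending node nor a key) or loops forever (a walk cycles): every starting node
-- must reach an ending node, i.e. lie in goodSet (a terminating walk has at most |dict| edges,
-- so |dict| rounds suffice).
def Pre_get_longest_explorator_path (starting_nodes : List String) (ending_nodes : List String) (dict_upstream_downstream : List (String × String × Int)) : Prop :=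
  ∀ s ∈ starting_nodes, s ∈ goodSet ending_nodes dict_upstream_downstream
instance (starting_nodes : List String) (ending_nodes : List String) (dict_upstream_downstream : List (String × String × Int)) : Decidable (Pre_get_longest_explorator_path starting_nodes ending_nodes dict_upstream_downstream) := by
  unfold Pre_get_longest_explorator_path; infer_instance

def pvWitness_get_longest_explorator_path : List String × List String × (List (String × String × Int)) :=
  (["a", "b"], ["z"], [("a", "b", 2), ("b", "z", 3)])

def Spec_get_longest_explorator_path (starting_nodes : List String) (ending_nodes : List String) (dict_upstream_downstream : List (String × String × Int)) (out : Option (List String)) : Prop := out = get_longest_explorator_path_alt starting_nodes ending_nodes dict_upstream_downstream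
instance (starting_nodes : List String) (ending_nodes : List String) (dict_upstream_downstream : List (String × String × Int)) (out : Option (List String)) : Decidable (Spec_get_longest_explorator_path starting_nodes ending_nodes dict_upstream_downstream out) := by unfold Spec_get_longest_explorator_path; infer_instance

-- ===== CLAIM (what is proved, stated in full; the proofs are below) =====
def Claim_equal_get_longest_explorator_path : Prop := ∀ (starting_nodes : List String) (ending_nodes : List String) (dict_upstream_downstream : List (String × String × Int)), Dom_get_longest_explorator_path starting_nodes ending_nodes dict_upstream_downstream → Pre_get_longest_explorator_path starting_nodes ending_nodes dict_upstream_downstream → Spec_get_longest_explorator_path starting_nodes ending_nodes dict_upstream_downstream (get_longest_explorator_path starting_nodes ending_nodes dict_upstream_downstream)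

-- ===== LEMMAS AND PROOFS =====
-- reference walk: full path and distance from a node to its ending node
def specPath (E : List String) (D : List (String × String × Int)) :
    Nat → String → Option (List String × Int)
  | 0, _ => none
  | f+1, n =>
    if n ∈ E then some ([n], 0)
    else
      match pvLookup D n with
      | none => none
      | some (m, e) =>
        match specPath E D f m with
        | none => none
        | some (p, d) => some (n :: p, e + d)

lemma specPath_succ (E : List String) (D : List (String × String × Int)) :
    ∀ (f : Nat) (n : String) (r : List String × Int),
      specPath E D f n = some r → specPath E D (f+1) n = some r := by
  intro f
  induction f with
  | zero => intro n r h; simp [specPath] at h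
  | succ f ih =>
    intro n r h
    rw [specPath] at h ⊢
    by_cases hE : n ∈ E
    · simpa [hE] using h
    · simp only [if_neg hE] at h ⊢
      cases hL : pvLookup D n with
      | none => simp [hL] at h
      | some me =>
        obtain ⟨m, e⟩ := me
        rw [hL] at h
        dsimp only at h ⊢
        cases hS : specPath E D f m with
        | none => simp [hS] at h
        | some pd =>
          rw [hS] at h
          rw [ih m pd hS]
          exact h

lemma specPath_mono (E : List String) (D : List (String × String × Int))
    {f g : Nat} (hfg : f ≤ g) {n : String} {r : List String × Int}
    (h : specPath E D f n = some r) : specPath E D g n = some r := by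
  induction hfg with
  | refl => exact h
  | step _ ih => exact specPath_succ E D _ n r ih


lemma good_spec (E : List String) (D : List (String × String × Int)) :
    ∀ (k : Nat) (n : String),
      n ∈ (fun S => S ++ (D.map (fun pr => pr.1)).filter
          (fun k => match pvLookup D k with
                    | some (m, _) => decide (m ∈ S)
                    | none => false))^[k] E →
      ∃ r, specPath E D (k + 1) n = some r := by
  intro k
  induction k with
  | zero =>
    intro n h
    simp only [Function.iterate_zero, id] at h
    exact ⟨([n], 0), by rw [specPath]; simp [h]⟩
  | succ k ih =>
    intro n h
    by_cases hE : n ∈ E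
    · exact ⟨([n], 0), by rw [specPath]; simp [hE]⟩
    · rw [Function.iterate_succ_apply'] at h
      simp only [List.mem_append] at h
      rcases h with h | h
      · obtain ⟨r, hr⟩ := ih n h
        exact ⟨r, specPath_succ E D _ n r hr⟩
      · rw [List.mem_filter] at h
        obtain ⟨-, hc⟩ := h
        cases hL : pvLookup D n with
        | none => rw [hL] at hc; simp at hc
        | some me =>
          obtain ⟨m, e⟩ := me
          rw [hL] at hc
          simp only [decide_eq_true_eq] at hc
          obtain ⟨⟨p, d⟩, hS⟩ := ih m hc
          refine ⟨(n :: p, e + d), ?_⟩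
          rw [specPath, if_neg hE, hL]
          dsimp only
          rw [hS]

lemma goodSet_spec (E : List String) (D : List (String × String × Int)) (n : String)
    (h : n ∈ goodSet E D) : ∃ r, specPath E D (D.length + 1) n = some r :=
  good_spec E D D.length n h

lemma walkA_spec (E : List String) (D : List (String × String × Int)) :
    ∀ (f : Nat) (n : String) (acc : List String) (dist : Int) (r : List String × Int),
      specPath E D f n = some r →
      walkA E D f (n :: acc) dist = some (acc.reverse ++ r.1, dist + r.2) := by
  intro f
  induction f with
  | zero => intro n acc dist r h; simp [specPath] at h
  | succ f ih =>
    intro n acc dist r h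
    rw [specPath] at h
    rw [walkA]
    by_cases hE : n ∈ E
    · simp only [if_pos hE] at h ⊢
      obtain ⟨p, d⟩ := r
      simp at h
      obtain ⟨hp, hd⟩ := h
      subst hp; subst hd
      simp
    · simp only [if_neg hE] at h ⊢
      cases hL : pvLookup D n with
      | none => simp [hL] at h
      | some me =>
        obtain ⟨m, e⟩ := me
        rw [hL] at h
        dsimp only at h ⊢
        cases hS : specPath E D f m with
        | none => simp [hS] at h
        | some pd =>
          obtain ⟨p', d'⟩ := pd
          rw [hS] at h
          dsimp only at h
          obtain ⟨p, d⟩ := r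
          simp at h
          obtain ⟨hp, hd⟩ := h
          rw [ih m (n :: acc) (dist + e) (p', d') hS]
          subst hp; subst hd
          simp [List.reverse_cons, List.append_assoc, Int.add_assoc]

lemma reconB_spec (E : List String) (D : List (String × String × Int)) :
    ∀ (f g : Nat) (n : String) (acc : List String) (r : List String × Int),
      f ≤ g → specPath E D f n = some r →
      reconB E D g (n :: acc) = some (acc.reverse ++ r.1) := by
  intro f
  induction f with
  | zero => intro g n acc r _ h; simp [specPath] at h
  | succ f ih =>
    intro g n acc r hfg h
    obtain ⟨g', rfl⟩ : ∃ g', g = g' + 1 := ⟨g - 1, by omega⟩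
    rw [specPath] at h
    rw [reconB]
    by_cases hE : n ∈ E
    · simp only [if_pos hE] at h ⊢
      obtain ⟨p, d⟩ := r
      simp at h
      obtain ⟨hp, -⟩ := h
      subst hp
      simp
    · simp only [if_neg hE] at h ⊢
      cases hL : pvLookup D n with
      | none => simp [hL] at h
      | some me =>
        obtain ⟨m, e⟩ := me
        rw [hL] at h
        dsimp only at h ⊢
        cases hS : specPath E D f m with
        | none => simp [hS] at h
        | some pd =>
          obtain ⟨p', d'⟩ := pd
          rw [hS] at h
          dsimp only at h
          obtain ⟨p, d⟩ := r
          simp at h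
          obtain ⟨hp, -⟩ := h
          rw [ih g' m (n :: acc) (p', d') (by omega) hS]
          subst hp
          simp [List.reverse_cons, List.append_assoc]

-- the memo only ever holds true distances-to-end
def MemoInv (E : List String) (D : List (String × String × Int))
    (memo : PySem.Dict String Int) : Prop :=
  ∀ (n : String) (d : Int), memo.get? n = some d →
    ∃ p, specPath E D (D.length + 1) n = some (p, d)

lemma stackB_fold_ok (E : List String) (D : List (String × String × Int)) :
    ∀ (f g : Nat) (n : String) (stack : List (String × Int)) (memo : PySem.Dict String Int)
      (p : List String) (d : Int),
      f ≤ g → f ≤ D.length + 1 →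
      specPath E D f n = some (p, d) → MemoInv E D memo →
      ∃ cur ext d0 memo',
        stackB E D g memo n stack = some (cur, stack ++ ext) ∧
        (if cur ∈ E then some (0 : Int) else memo.get? cur) = some d0 ∧
        ext.reverse.foldl (fun ac pr => (ac.1 + pr.2, ac.2.insert pr.1 (ac.1 + pr.2))) (d0, memo)
          = (d, memo') ∧
        MemoInv E D memo' := by
  intro f
  induction f with
  | zero => intro g n stack memo p d _ _ h _; simp [specPath] at h
  | succ f ih =>
    intro g n stack memo p d hfg hF h hinv
    obtain ⟨g', rfl⟩ : ∃ g', g = g' + 1 := ⟨g - 1, by omega⟩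
    rw [specPath] at h
    rw [stackB]
    by_cases hE : n ∈ E
    · simp only [if_pos hE] at h
      obtain ⟨hp, hd⟩ := (by simpa using h : [n] = p ∧ (0:Int) = d)
      refine ⟨n, [], 0, memo, ?_, ?_, ?_, hinv⟩
      · simp [hE]
      · simp [hE]
      · simp [← hd]
    · simp only [if_neg hE] at h
      cases hL : pvLookup D n with
      | none => simp [hL] at h
      | some me =>
        obtain ⟨m, e⟩ := me
        rw [hL] at h
        dsimp only at h
        cases hS : specPath E D f m with
        | none => simp [hS] at h
        | some pd' =>
          obtain ⟨p', d'⟩ := pd'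
          rw [hS] at h
          dsimp only at h
          obtain ⟨hp, hd⟩ := (by simpa using h : n :: p' = p ∧ e + d' = d)
          have hcur : specPath E D (f+1) n = some (p, d) := by
            rw [specPath]; simp only [if_neg hE]; rw [hL]; dsimp only; rw [hS]; dsimp only
            rw [hp, hd]
          by_cases hM : (memo.get? n).isSome
          · obtain ⟨dn, hdn⟩ := Option.isSome_iff_exists.mp hM
            obtain ⟨pn, hpn⟩ := hinv n dn hdn
            have hFn := specPath_mono E D hF hcur
            rw [hpn] at hFn
            have hpair : (pn, dn) = (p, d) := Option.some.inj hFn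
            have hdnd : dn = d := congrArg Prod.snd hpair
            refine ⟨n, [], dn, memo, ?_, ?_, ?_, hinv⟩
            · simp [hE, hM]
            · simp [hE, hdn]
            · simp [hdnd]
          · have hMn : memo.get? n = none := Option.not_isSome_iff_eq_none.mp hM
            obtain ⟨cur, ext, d0, memo0, h1, h2, h3, h4⟩ :=
              ih g' m (stack ++ [(n, e)]) memo p' d' (by omega) (by omega) hS hinv
            have hde : d' + e = d := by omega
            refine ⟨cur, (n, e) :: ext, d0, memo0.insert n (d' + e), ?_, h2, ?_, ?_⟩
            · have hcond : ¬(n ∈ E ∨ (memo.get? n).isSome) := by simp [hE, hM]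
              simp only [if_neg hcond]
              rw [h1]
              simp [List.append_assoc]
            · rw [List.reverse_cons, List.foldl_append, h3]
              simp only [List.foldl_cons, List.foldl_nil]
              rw [hde]
            · intro x dx hx
              rcases eq_or_ne x n with heq | hne
              · subst heq
                rw [PySem.Dict.get?_insert_self] at hx
                have hdx : dx = d' + e := (Option.some.inj hx).symm
                refine ⟨x :: p', ?_⟩
                rw [specPath_mono E D hF hcur, ← hp, ← hd]
                rw [hdx]
                rw [Int.add_comm e d']
              · rw [PySem.Dict.get?_insert, if_neg hne] at hx
                exact h4 x dx hx

lemma distB_spec (E : List String) (D : List (String × String × Int))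
    (memo : PySem.Dict String Int) (n : String) (p : List String) (d : Int)
    (h : specPath E D (D.length + 1) n = some (p, d)) (hinv : MemoInv E D memo) :
    ∃ memo', distB E D memo n = some (d, memo') ∧ MemoInv E D memo' := by
  obtain ⟨cur, ext, d0, memo', h1, h2, h3, h4⟩ :=
    stackB_fold_ok E D (D.length + 1) (D.length + 1) n [] memo p d le_rfl le_rfl h hinv
  refine ⟨memo', ?_, h4⟩
  unfold distB
  rw [h1]
  dsimp only [List.nil_append]
  rw [h2]
  dsimp only
  rw [h3]

-- relation between A's fold state and B's fold state
def StRel (E : List String) (D : List (String × String × Int))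
    (a : Int × Option (List String)) (b : PySem.Dict String Int × Int × Option String) : Prop :=
  b.2.1 = a.1 ∧ MemoInv E D b.1 ∧
    ((b.2.2 = none ∧ a.2 = none) ∨
     (∃ s p dd, b.2.2 = some s ∧ a.2 = some p ∧ specPath E D (D.length + 1) s = some (p, dd)))

lemma fold_rel (E : List String) (D : List (String × String × Int)) :
    ∀ (ss : List String) (a : Int × Option (List String))
      (b : PySem.Dict String Int × Int × Option String),
      (∀ s ∈ ss, s ∈ goodSet E D) →
      StRel E D a b →
      StRel E D
        (ss.foldl (fun st s =>
          match walkA E D (D.length + 1) [s] 0 with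
          | none => st
          | some (p, d) => if d > st.1 then (d, some p) else st) a)
        (ss.foldl (fun st s =>
          match distB E D st.1 s with
          | none => st
          | some (d, memo') => if d > st.2.1 then (memo', d, some s) else (memo', st.2.1, st.2.2)) b) := by
  intro ss
  induction ss with
  | nil => intro a b _ hrel; simpa using hrel
  | cons s rest ih =>
    intro a b hss hrel
    simp only [List.foldl_cons]
    apply ih
    · intro x hx; exact hss x (by simp [hx])
    · unfold StRel at hrel ⊢
      obtain ⟨hbd, hinv, hopt⟩ := hrel
      obtain ⟨⟨p, d⟩, hS⟩ := goodSet_spec E D s (hss s (by simp))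
      have hw := walkA_spec E D _ s [] 0 (p, d) hS
      simp only [List.reverse_nil, List.nil_append, zero_add] at hw
      rw [hw]
      obtain ⟨memo', hdB, hinv'⟩ := distB_spec E D b.1 s p d hS hinv
      rw [hdB]
      dsimp only
      rw [hbd]
      by_cases hgt : d > a.1
      · simp only [if_pos hgt]
        exact ⟨trivial, hinv', Or.inr ⟨s, p, d, rfl, rfl, hS⟩⟩
      · simp only [if_neg hgt]
        exact ⟨trivial, hinv', hopt⟩

-- ===== VERDICT (by name: the statement is the Claim_ definition above) =====
theorem get_longest_explorator_path_spec : Claim_equal_get_longest_explorator_path := by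
  intro S En Dd _ hpre
  unfold Spec_get_longest_explorator_path
  unfold get_longest_explorator_path get_longest_explorator_path_alt
  have h0 : StRel En Dd ((0 : Int), (none : Option (List String)))
      (PySem.Dict.empty, (0 : Int), (none : Option String)) := by
    refine ⟨rfl, ?_, Or.inl ⟨rfl, rfl⟩⟩
    intro n d h
    rw [PySem.Dict.get?_empty] at h
    cases h
  have hrel := fold_rel En Dd S _ _ hpre h0
  obtain ⟨hbd, hinv, hopt⟩ := hrel
  dsimp only
  rcases hopt with ⟨hw, ha⟩ | ⟨s, p, dd, hw, ha, hS⟩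
  · rw [ha, hw]
  · rw [ha, hw]
    dsimp only
    rw [reconB_spec En Dd (Dd.length + 1) (Dd.length + 1) s [] (p, dd) le_rfl hS]
    simp
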